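-- pv_equiv track=rewrite | github.com/Aditya-PS-05/codesm | codesm/session/context.py | prune_tool_outputs
-- ===== SOURCE A (Python) =====
-- def prune_tool_outputs(
--
--     messages: list[dict],
--     keep_recent: int = 4,
--     max_output_chars: int = 4000,
-- ) -> list[dict]:
--     """
--     Prune large tool outputs from older messages.
--
--     - Keep the most recent `keep_recent` tool/tool_display messages unmodified
--     - For older ones, if content > max_output_chars, replace with "[OUTPUT PRUNED: N chars]"
--     - Keep message structure intact (tool_call_id, role, etc.)
--     """
--     if not messages:
--         return []
--
--     result = []
--
--     # Find indices of tool response messages (role == "tool")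
--     tool_indices = [
--         i for i, msg in enumerate(messages)
--         if msg.get("role") == "tool"
--     ]
--
--     # Determine which tool messages to keep unmodified
--     recent_tool_indices = set(tool_indices[-keep_recent:]) if tool_indices else set()
--
--     for i, msg in enumerate(messages):
--         if msg.get("role") != "tool":
--             result.append(msg)
--             continue
--
--         # Tool message - check if it should be pruned
--         if i in recent_tool_indices:
--             result.append(msg)
--             continue
--
--         # Older tool message - check content size
--         content = msg.get("content", "")
--         if isinstance(content, str) and len(content) > max_output_chars:
--             pruned_msg = msg.copy()
--             pruned_msg["content"] = f"[OUTPUT PRUNED: {len(content)} chars]"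
--             result.append(pruned_msg)
--         else:
--             result.append(msg)
--
--     return result
-- ===== SOURCE B (Python) =====
-- def prune_tool_outputs(
--     messages: list[dict],
--     keep_recent: int = 4,
--     max_output_chars: int = 4000,
-- ) -> list[dict]:
--     """Walk messages newest-to-oldest; the first `keep_recent` tool messages
--     stay untouched, older tool messages with oversized string content are
--     replaced by a pruned placeholder."""
--     out = []
--     tools_seen = 0
--     for msg in reversed(messages):
--         if msg.get("role") == "tool":
--             if tools_seen >= keep_recent:
--                 content = msg.get("content", "")
--                 if isinstance(content, str) and len(content) > max_output_chars:
--                     msg = {**msg, "content": f"[OUTPUT PRUNED: {len(content)} chars]"}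
--             tools_seen += 1
--         out.append(msg)
--     out.reverse()
--     return out
-- ===== Notes on version B (the rewrite author's own statement) =====
-- stated objective: alternative
-- what changed: Replaces A's precomputed set of recent tool-message indices (enumerate + filter + slice + set, then an indexed forward loop with membership tests) by a single reverse pass that counts tool messages from the end and prune-checks those beyond the first keep_recent; Pre_ restricts keep_recent to positive values (the natural domain of a keep-count): for keep_recent <= 0 A's slice tool_indices[-keep_recent:] accidentally keeps all (or all but the first few) tool messages, an artefact of Python slicing.
import Mathlib
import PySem

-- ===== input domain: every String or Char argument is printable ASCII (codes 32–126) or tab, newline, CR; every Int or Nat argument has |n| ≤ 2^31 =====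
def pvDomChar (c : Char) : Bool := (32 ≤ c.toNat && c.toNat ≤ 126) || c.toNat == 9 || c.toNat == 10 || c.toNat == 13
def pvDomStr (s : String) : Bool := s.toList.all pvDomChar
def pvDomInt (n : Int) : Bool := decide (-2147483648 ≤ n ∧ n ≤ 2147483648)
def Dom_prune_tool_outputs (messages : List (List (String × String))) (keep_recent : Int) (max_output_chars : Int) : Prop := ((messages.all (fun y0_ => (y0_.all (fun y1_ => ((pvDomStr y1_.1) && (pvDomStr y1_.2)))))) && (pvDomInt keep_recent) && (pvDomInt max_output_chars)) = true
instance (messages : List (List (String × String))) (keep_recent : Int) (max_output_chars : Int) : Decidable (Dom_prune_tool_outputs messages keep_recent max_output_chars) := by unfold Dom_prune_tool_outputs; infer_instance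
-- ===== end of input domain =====

-- B replaces A's precomputed recent-tool-index set by one reverse pass with a counter (alternative decomposition, same cost).

-- ===== PORT A =====
def prune_tool_outputs (messages : List (List (String × String))) (keep_recent : Int) (max_output_chars : Int) : List (List (String × String)) :=
  if messages = [] then []
  else
    let tool_indices : List Int :=
      ((PySem.List.enumerate messages).filter
        (fun p => (PySem.Dict.mk p.2).get? "role" == some "tool")).map (fun p => p.1)
    let recent_tool_indices : PySem.Set Int :=
      if tool_indices ≠ [] then
        PySem.Set.ofList (PySem.List.slice tool_indices (some (-keep_recent)) none)
      else PySem.Set.empty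
    (PySem.List.enumerate messages).foldl
      (fun result p =>
        if ¬ ((PySem.Dict.mk p.2).get? "role" == some "tool") then result ++ [p.2]
        else if recent_tool_indices.contains p.1 then result ++ [p.2]
        else
          let content := (PySem.Dict.mk p.2).getD "content" ""
          if PySem.Str.len content > max_output_chars then
            result ++ [((PySem.Dict.mk p.2).insert "content"
              ("[OUTPUT PRUNED: " ++ PySem.Int.toStr (PySem.Str.len content) ++ " chars]")).items]
          else result ++ [p.2])
      []

-- ===== PORT B =====
def prune_tool_outputs_alt (messages : List (List (String × String))) (keep_recent : Int) (max_output_chars : Int) : List (List (String × String)) :=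
  let fin :=
    messages.reverse.foldl
      (fun (acc : List (List (String × String)) × Int) msg =>
        if (PySem.Dict.mk msg).get? "role" == some "tool" then
          if acc.2 ≥ keep_recent then
            let content := (PySem.Dict.mk msg).getD "content" ""
            if PySem.Str.len content > max_output_chars then
              (acc.1 ++ [((PySem.Dict.mk msg).insert "content"
                ("[OUTPUT PRUNED: " ++ PySem.Int.toStr (PySem.Str.len content) ++ " chars]")).items], acc.2 + 1)
            else (acc.1 ++ [msg], acc.2 + 1)
          else (acc.1 ++ [msg], acc.2 + 1)
        else (acc.1 ++ [msg], acc.2))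
      ([], 0)
  fin.1.reverse

-- ===== PRECONDITION & SPEC =====
-- Pre_ restricts keep_recent to positive values, the natural domain of a keep-count:
-- for keep_recent ≤ 0 A's slice tool_indices[-keep_recent:] accidentally keeps all
-- (or all but the first few) tool messages — an artefact of Python slicing.
def Pre_prune_tool_outputs (messages : List (List (String × String))) (keep_recent : Int) (max_output_chars : Int) : Prop := 1 ≤ keep_recent
instance (messages : List (List (String × String))) (keep_recent : Int) (max_output_chars : Int) : Decidable (Pre_prune_tool_outputs messages keep_recent max_output_chars) := by unfold Pre_prune_tool_outputs; infer_instance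

def pvWitness_prune_tool_outputs : (List (List (String × String))) × Int × Int :=
  ([[("role", "tool"), ("content", "hello")], [("role", "user"), ("content", "hi")]], 1, 3)

def Spec_prune_tool_outputs (messages : List (List (String × String))) (keep_recent : Int) (max_output_chars : Int) (out : List (List (String × String))) : Prop := out = prune_tool_outputs_alt messages keep_recent max_output_chars
instance (messages : List (List (String × String))) (keep_recent : Int) (max_output_chars : Int) (out : List (List (String × String))) : Decidable (Spec_prune_tool_outputs messages keep_recent max_output_chars out) := by unfold Spec_prune_tool_outputs; infer_instance

-- ===== CLAIM (what is proved, stated in full; the proofs are below) =====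
def Claim_equal_prune_tool_outputs : Prop := ∀ (messages : List (List (String × String))) (keep_recent : Int) (max_output_chars : Int), Dom_prune_tool_outputs messages keep_recent max_output_chars → Pre_prune_tool_outputs messages keep_recent max_output_chars → Spec_prune_tool_outputs messages keep_recent max_output_chars (prune_tool_outputs messages keep_recent max_output_chars)

-- ===== LEMMAS AND PROOFS =====

-- proof-only helpers
def pvIsTool (m : List (String × String)) : Bool :=
  (PySem.Dict.mk m).get? "role" == some "tool"

def pvPrune (mx : Int) (m : List (String × String)) : List (String × String) :=
  if PySem.Str.len ((PySem.Dict.mk m).getD "content" "") > mx then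
    ((PySem.Dict.mk m).insert "content"
      ("[OUTPUT PRUNED: " ++ PySem.Int.toStr (PySem.Str.len ((PySem.Dict.mk m).getD "content" "")) ++ " chars]")).items
  else m

-- common form: position j is kept untouched iff it is not a tool message or the
-- number of tool messages in the suffix starting at j is ≤ keep
def pvSpec (keep mx : Int) : List (List (String × String)) → List (List (String × String))
  | [] => []
  | m :: rest =>
      (if pvIsTool m then
        (if (((m :: rest).countP pvIsTool : Int)) > keep then pvPrune mx m else m)
       else m) :: pvSpec keep mx rest

def pvKeep (kr n : Int) : Int :=
  if kr > 0 then min kr n else if kr = 0 then n else max 0 (n + kr)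

def pvTi (l : List (List (String × String))) (s : Int) : List Int :=
  ((PySem.List.enumerate l s).filter (fun p => pvIsTool p.2)).map (fun p => p.1)

theorem pvTi_cons (m : List (String × String)) (rest : List (List (String × String))) (s : Int) :
    pvTi (m :: rest) s = (if pvIsTool m then [s] else []) ++ pvTi rest (s + 1) := by
  simp only [pvTi, PySem.List.enumerate_cons, List.filter_cons]
  split <;> simp

theorem pvTi_length (l : List (List (String × String))) (s : Int) :
    (pvTi l s).length = l.countP pvIsTool := by
  induction l generalizing s with
  | nil => rfl
  | cons m rest ih =>
      rw [pvTi_cons, List.countP_cons]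
      by_cases h : pvIsTool m <;> simp [h, ih]

theorem pvTi_ge (l : List (List (String × String))) (s : Int) (x : Int) (hx : x ∈ pvTi l s) :
    s ≤ x := by
  induction l generalizing s with
  | nil => simp [pvTi] at hx
  | cons m rest ih =>
      rw [pvTi_cons] at hx
      rcases List.mem_append.1 hx with h | h
      · split at h <;> simp at h; omega
      · have := ih (s + 1) h; omega

theorem pvTi_self (l : List (List (String × String))) (s : Int) (k : Nat) (hk : k < l.length)
    (ht : pvIsTool l[k]) : (s + k : Int) ∈ pvTi l s := by
  induction l generalizing s k with
  | nil => simp at hk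
  | cons m rest ih =>
      rw [pvTi_cons]
      cases k with
      | zero => simp at ht; simp [ht]
      | succ k =>
          refine List.mem_append.2 (Or.inr ?_)
          have := ih (s + 1) k (by simpa using Nat.lt_of_succ_lt_succ hk) (by simpa using ht)
          have h : s + ((k : Int) + 1) = s + 1 + k := by ring
          simpa [h] using this

theorem pvTi_mem_drop (l : List (List (String × String))) (s : Int) (k a : Nat)
    (hk : k < l.length) (ht : pvIsTool l[k]) :
    ((s + k : Int) ∈ (pvTi l s).drop a ↔ (l.drop k).countP pvIsTool ≤ (pvTi l s).length - a) := by
  induction l generalizing s k a with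
  | nil => simp at hk
  | cons m rest ih =>
      have hlen : (pvTi rest (s + 1)).length = rest.countP pvIsTool := pvTi_length _ _
      cases k with
      | zero =>
          simp only [List.getElem_cons_zero] at ht
          rw [pvTi_cons]
          cases a with
          | zero =>
              simp [ht, hlen]
          | succ a =>
              have hnot : (s : Int) ∉ (pvTi rest (s + 1)).drop a := fun h =>
                absurd (pvTi_ge _ _ _ (List.mem_of_mem_drop h)) (by omega)
              simp [ht, hlen, hnot]
      | succ k =>
          have hk' : k < rest.length := Nat.lt_of_succ_lt_succ hk
          have ht' : pvIsTool rest[k] := by simpa using ht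
          have hdrop : (m :: rest).drop (k + 1) = rest.drop k := rfl
          have hx : (s + ((k : Nat) + 1 : Nat) : Int) = (s + 1) + (k : Int) := by push_cast; ring
          by_cases hm : pvIsTool m
          · rw [pvTi_cons]
            simp only [hm, if_pos, List.singleton_append, List.length_cons]
            cases a with
            | zero =>
                have hmem := pvTi_self rest (s + 1) k hk' ht'
                have hcle := (List.drop_sublist k rest).countP_le (p := pvIsTool)
                rw [List.drop_zero, hdrop, hx]
                constructor
                · intro _; omega
                · intro _; exact List.mem_cons.2 (Or.inr hmem)
            | succ a =>
                rw [List.drop_succ_cons, hdrop, hx]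
                have hiff := ih (s + 1) k a hk' ht'
                constructor
                · intro h; have := hiff.1 h; omega
                · intro h; exact hiff.2 (by omega)
          · rw [pvTi_cons]
            simp only [hm, Bool.false_eq_true, if_false, List.nil_append]
            rw [hdrop, hx]
            exact ih (s + 1) k a hk' ht'

-- A's indexed map equals pvSpec, given a characterisation of the recent-index set
theorem pvMap_eq_spec (mx keep : Int) (S : PySem.Set Int)
    (l : List (List (String × String))) (s : Int)
    (H : ∀ (k : Nat), (hk : k < l.length) → pvIsTool l[k] →
      ((S.contains (s + k) = true) ↔ (((l.drop k).countP pvIsTool : Int) ≤ keep))) :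
    (PySem.List.enumerate l s).map
      (fun p => if ¬ ((PySem.Dict.mk p.2).get? "role" == some "tool") then p.2
        else if S.contains p.1 then p.2 else pvPrune mx p.2)
    = pvSpec keep mx l := by
  induction l generalizing s with
  | nil => rfl
  | cons m rest ih =>
      rw [PySem.List.enumerate_cons, List.map_cons, pvSpec]
      have IH := ih (s + 1) (fun k hk ht => by
        have := H (k + 1) (Nat.succ_lt_succ hk) (by simpa using ht)
        rw [show (s + ((k : Nat) + 1 : Nat) : Int) = (s + 1) + k by push_cast; ring] at this
        simpa using this)
      rw [IH]
      congr 1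
      by_cases ht : pvIsTool m
      · have H0 := H 0 (by simp) (by simpa using ht)
        simp only [List.drop_zero] at H0
        simp only [pvIsTool] at ht
        have hcc : (m :: rest).countP pvIsTool = rest.countP pvIsTool + 1 := by
          simp [pvIsTool, ht]
        by_cases hc : S.contains s
        · have hle : ((m :: rest).countP pvIsTool : Int) ≤ keep := H0.1 (by simpa using hc)
          have hmem : s ∈ S := by simpa using hc
          have h2 : ¬ keep ≤ ((rest.countP pvIsTool : Nat) : Int) := by
            rw [hcc] at hle; push_cast at hle ⊢; omega
          simp [ht, hmem, pvIsTool, hcc, h2]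
        · have hnm : s ∉ S := by simpa using hc
          have hgt : keep < ((m :: rest).countP pvIsTool : Int) := by
            by_contra hle
            exact hc (by simpa using H0.2 (by omega))
          have h2 : keep ≤ ((rest.countP pvIsTool : Nat) : Int) := by
            rw [hcc] at hgt; push_cast at hgt ⊢; omega
          simp [ht, hnm, pvIsTool, hcc, h2]
      · simp only [pvIsTool] at ht
        simp [ht, pvIsTool]

theorem pvSlice_from_eq_drop {α : Type} (xs : List α) (i : Int) :
    PySem.List.slice xs (some i) none = xs.drop (PySem.List.clampIdx xs.length i) := by
  simp only [PySem.List.slice]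
  exact List.take_of_length_le (by simp)

theorem pvA_eq (messages : List (List (String × String))) (keep_recent mx : Int) :
    prune_tool_outputs messages keep_recent mx
      = pvSpec (pvKeep keep_recent (messages.countP pvIsTool)) mx messages := by
  by_cases hm : messages = []
  · subst hm; rfl
  · rw [prune_tool_outputs, if_neg hm]
    have hS : (if pvTi messages 0 ≠ [] then
          PySem.Set.ofList (PySem.List.slice (pvTi messages 0) (some (-keep_recent)) none)
        else PySem.Set.empty)
        = PySem.Set.ofList (PySem.List.slice (pvTi messages 0) (some (-keep_recent)) none) := by
      by_cases h : pvTi messages 0 = [] <;> simp [h, PySem.List.slice, PySem.Set.ofList]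
    show (PySem.List.enumerate messages).foldl _ [] = _
    rw [show ((PySem.List.enumerate messages).filter
        (fun p => (PySem.Dict.mk p.2).get? "role" == some "tool")).map (fun p => p.1)
      = pvTi messages 0 from rfl, hS]
    have hbody : (fun (result : List (List (String × String))) (p : Int × List (String × String)) =>
        if ¬ ((PySem.Dict.mk p.2).get? "role" == some "tool") then result ++ [p.2]
        else if (PySem.Set.ofList (PySem.List.slice (pvTi messages 0) (some (-keep_recent)) none)).contains p.1 then result ++ [p.2]
        else
          let content := (PySem.Dict.mk p.2).getD "content" ""
          if PySem.Str.len content > mx then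
            result ++ [((PySem.Dict.mk p.2).insert "content"
              ("[OUTPUT PRUNED: " ++ PySem.Int.toStr (PySem.Str.len content) ++ " chars]")).items]
          else result ++ [p.2])
      = (fun result p =>
        result ++ [if ¬ ((PySem.Dict.mk p.2).get? "role" == some "tool") then p.2
          else if (PySem.Set.ofList (PySem.List.slice (pvTi messages 0) (some (-keep_recent)) none)).contains p.1 then p.2
          else pvPrune mx p.2]) := by
      funext r p
      simp only [pvPrune]
      split_ifs <;> rfl
    rw [hbody, PySem.List.foldl_append_singleton_eq_map, List.nil_append]
    apply pvMap_eq_spec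
    intro k hk ht
    have hlen : (pvTi messages 0).length = messages.countP pvIsTool := pvTi_length _ _
    have ha : PySem.List.clampIdx (pvTi messages 0).length (-keep_recent)
        ≤ (pvTi messages 0).length := by
      simp only [PySem.List.clampIdx]; split_ifs <;> omega
    have hmem : ((PySem.Set.ofList (PySem.List.slice (pvTi messages 0) (some (-keep_recent)) none)).contains ((0 : Int) + k) = true)
        ↔ ((0 : Int) + k) ∈ (pvTi messages 0).drop
            (PySem.List.clampIdx (pvTi messages 0).length (-keep_recent)) := by
      rw [← pvSlice_from_eq_drop]
      simp only [PySem.Set.contains, List.contains_iff_mem]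
      exact PySem.Set.mem_ofList _ _
    rw [hmem, pvTi_mem_drop messages 0 k _ hk ht]
    have hkeq : pvKeep keep_recent (messages.countP pvIsTool)
        = ((pvTi messages 0).length : Int)
          - (PySem.List.clampIdx (pvTi messages 0).length (-keep_recent) : Int) := by
      rw [hlen] at *
      simp only [pvKeep, PySem.List.clampIdx, min_def, max_def]
      split_ifs <;> omega
    rw [hkeq]
    omega

-- the thresholds only matter up to the total tool count, so they may be exchanged
theorem pvSpec_congr (mx k k' : Int) (l : List (List (String × String)))
    (h : ∀ (c : Nat), c ≤ l.countP pvIsTool → (((c : Int) > k) ↔ ((c : Int) > k'))) :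
    pvSpec k mx l = pvSpec k' mx l := by
  induction l with
  | nil => rfl
  | cons m rest ih =>
      have hle : rest.countP pvIsTool ≤ (m :: rest).countP pvIsTool := by
        rw [List.countP_cons]; omega
      rw [pvSpec, pvSpec, ih (fun c hc => h c (le_trans hc hle))]
      congr 1
      by_cases ht : pvIsTool m
      · rw [if_pos ht, if_pos ht]
        exact if_congr (h _ le_rfl) rfl rfl
      · rw [if_neg ht, if_neg ht]

theorem pvAlt_loop (keep mx : Int) (l : List (List (String × String))) :
    l.reverse.foldl
      (fun (acc : List (List (String × String)) × Int) msg =>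
        if (PySem.Dict.mk msg).get? "role" == some "tool" then
          if acc.2 ≥ keep then
            let content := (PySem.Dict.mk msg).getD "content" ""
            if PySem.Str.len content > mx then
              (acc.1 ++ [((PySem.Dict.mk msg).insert "content"
                ("[OUTPUT PRUNED: " ++ PySem.Int.toStr (PySem.Str.len content) ++ " chars]")).items], acc.2 + 1)
            else (acc.1 ++ [msg], acc.2 + 1)
          else (acc.1 ++ [msg], acc.2 + 1)
        else (acc.1 ++ [msg], acc.2))
      ([], 0)
    = ((pvSpec keep mx l).reverse, (l.countP pvIsTool : Int)) := by
  induction l with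
  | nil => simp [pvSpec]
  | cons m rest ih =>
      rw [List.reverse_cons, List.foldl_append, ih, List.foldl_cons, List.foldl_nil]
      by_cases ht : pvIsTool m
      · have ht' := ht; simp only [pvIsTool] at ht'
        have hcc : (m :: rest).countP pvIsTool = rest.countP pvIsTool + 1 := by
          simp [ht]
        by_cases hge : ((rest.countP pvIsTool : Nat) : Int) ≥ keep
        · have hgt' : (((m :: rest).countP pvIsTool : Nat) : Int) > keep := by
            rw [hcc]; push_cast; push_cast at hge; omega
          simp [ht', hge, pvSpec, ht, pvPrune, hcc]
          split_ifs <;> simp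
        · have hle : ¬ (((m :: rest).countP pvIsTool : Nat) : Int) > keep := by
            rw [hcc]; push_cast; push_cast at hge; omega
          simp [ht', hge, pvSpec, ht, hcc]
      · have ht' := ht; simp only [pvIsTool] at ht'
        simp [ht', pvSpec, ht]

theorem pvB_eq (messages : List (List (String × String))) (keep_recent mx : Int) :
    prune_tool_outputs_alt messages keep_recent mx
      = pvSpec keep_recent mx messages := by
  rw [prune_tool_outputs_alt]
  show (messages.reverse.foldl _ ([], 0)).1.reverse = _
  rw [pvAlt_loop, List.reverse_reverse]

-- ===== VERDICT (by name: the statement is the Claim_ definition above) =====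
theorem prune_tool_outputs_spec : Claim_equal_prune_tool_outputs := by
  intro messages keep_recent max_output_chars _ hpre
  unfold Spec_prune_tool_outputs
  rw [pvA_eq, pvB_eq]
  apply pvSpec_congr
  intro c hc
  have hpre' : (1 : Int) ≤ keep_recent := hpre
  have hcn : (c : Int) ≤ ((messages.countP pvIsTool : Nat) : Int) := by exact_mod_cast hc
  simp only [pvKeep, if_pos (by omega : keep_recent > 0), min_def]
  split_ifs <;> omega
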